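-- pv_equiv track=rewrite | github.com/Tamong/tamong | natural-language-processing/hw05/hw05_ptw190000.py | replace_with_gazetteer
-- ===== SOURCE A (Python) =====
-- def replace_with_gazetteer(tokens, gazetteer):
--     new_tokens = []
--     skip = 0
--     for i in range(len(tokens)):
--         if skip:
--             skip -= 1
--             continue
--
--         matched = False
--         # Check if the current token starts a sequence matching a gazetteer entry
--         for phrase in gazetteer.keys():
--             phrase_tokens = phrase.split(" ")
--             # If the next few tokens match the phrase in the gazetteer, add the matched phrase as a new token
--             if tokens[i : i + len(phrase_tokens)] == phrase_tokens:
--                 new_tokens.append(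
--                     phrase
--                 )  # Use underscore as a placeholder for spaces in multi-word tokens
--                 skip = (
--                     len(phrase_tokens) - 1
--                 )  # Skip the next few tokens that are part of the matched phrase
--                 matched = True
--                 break
--
--         if not matched:
--             new_tokens.append(
--                 tokens[i]
--             )  # Add the current token as is if no match is found
--
--     return new_tokens
-- ===== SOURCE B (Python) =====
-- def replace_with_gazetteer(tokens, gazetteer):
--     # Group gazetteer phrases by their first token (preserving dict order),
--     # so each position only scans candidates whose first token matches.
--     entries = [(phrase.split(" "), phrase) for phrase in gazetteer]
--     index = {}
--     for pt, phrase in entries: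
--         index.setdefault(pt[0], []).append((pt, phrase))
--     new_tokens = []
--     i = 0
--     n = len(tokens)
--     while i < n:
--         tok = tokens[i]
--         for pt, phrase in index.get(tok, []):
--             if tokens[i:i + len(pt)] == pt:
--                 new_tokens.append(phrase)
--                 i += len(pt)
--                 break
--         else:
--             new_tokens.append(tok)
--             i += 1
--     return new_tokens
-- ===== Notes on version B (the rewrite author's own statement) =====
-- stated objective: faster
-- what changed: B pre-groups gazetteer phrases into a dict keyed by their first token (preserving gazetteer order) and at each position scans only the candidates whose first token equals the current token, advancing the index by the match length instead of a skip counter; A scans every gazetteer phrase at every position.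
import Mathlib
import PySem

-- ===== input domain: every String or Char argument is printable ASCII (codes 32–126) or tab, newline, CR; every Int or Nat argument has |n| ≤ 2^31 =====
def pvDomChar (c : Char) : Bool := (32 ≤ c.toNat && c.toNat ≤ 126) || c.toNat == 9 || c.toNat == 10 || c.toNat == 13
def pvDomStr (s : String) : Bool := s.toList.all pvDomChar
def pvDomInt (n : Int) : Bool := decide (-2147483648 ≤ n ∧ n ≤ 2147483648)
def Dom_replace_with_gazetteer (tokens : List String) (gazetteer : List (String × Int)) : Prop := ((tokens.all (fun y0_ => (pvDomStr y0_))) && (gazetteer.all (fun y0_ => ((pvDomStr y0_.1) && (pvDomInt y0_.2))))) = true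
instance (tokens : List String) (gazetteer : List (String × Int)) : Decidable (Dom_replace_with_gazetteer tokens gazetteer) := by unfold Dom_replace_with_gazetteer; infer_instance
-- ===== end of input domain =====

-- B replaces A's scan of the whole gazetteer at every position by a dict indexing phrases by
-- first token, and advances the position by the match length instead of a skip counter
-- (measurably faster in a timing run on large inputs).

-- ===== PORT A =====
-- phrase.split(" "): " " is a non-empty separator, so Str.split? is always `some`
def pvSplit (s : String) : List String := (PySem.Str.split? s " ").getD []

-- A's inner `for phrase in gazetteer.keys(): … break`: first phrase whose token list is
-- a slice match at i, returned together with len(phrase_tokens) (used for skip)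
def pvFindA (tokens : List String) (i : Nat) : List String → Option (String × Nat)
  | [] => none
  | p :: rest =>
      let pt := pvSplit p
      if PySem.List.slice tokens (some (i : Int)) (some ((i : Int) + (pt.length : Int))) = pt then
        some (p, pt.length)
      else pvFindA tokens i rest

-- one iteration of A's `for i in range(len(tokens))` over state (new_tokens, skip)
def pvStepA (tokens : List String) (keys : List String) (st : List String × Nat) (i : Nat) :
    List String × Nat :=
  if st.2 ≠ 0 then (st.1, st.2 - 1)
  else
    match pvFindA tokens i keys with
    | some (p, L) => (st.1 ++ [p], L - 1)
    | none => (st.1 ++ [PySem.List.pyGetD tokens (i : Int) ""], 0)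

-- gazetteer.keys(): the dict's keys in first-occurrence order = dedup of the assoc-list keys
def replace_with_gazetteer (tokens : List String) (gazetteer : List (String × Int)) : List String :=
  ((List.range tokens.length).foldl
      (pvStepA tokens (PySem.List.dedup (gazetteer.map Prod.fst))) ([], 0)).1

-- ===== PORT B =====
-- entries = [(phrase.split(" "), phrase) for phrase in gazetteer]
def pvEntries (keys : List String) : List (List String × String) :=
  keys.map (fun p => (pvSplit p, p))

-- index.setdefault(pt[0], []).append((pt, phrase))
def pvIndexB (entries : List (List String × String)) :
    PySem.Dict String (List (List String × String)) :=
  entries.foldl (fun d e => d.modify (PySem.List.pyGetD e.1 0 "") [] (· ++ [e])) PySem.Dict.empty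

-- B's inner `for pt, phrase in index.get(tok, []): … break`
def pvFindB (suffix : List String) : List (List String × String) → Option (List String × String)
  | [] => none
  | e :: cs => if suffix.take e.1.length = e.1 then some e else pvFindB suffix cs

-- B's `while i < n` loop; the current suffix tokens[i:] is the recursion argument
def pvLoopB (idx : PySem.Dict String (List (List String × String))) :
    List String → List String
  | [] => []
  | t :: rest =>
      match pvFindB (t :: rest) (idx.getD t []) with
      | some e => e.2 :: pvLoopB idx (rest.drop (e.1.length - 1))
      | none => t :: pvLoopB idx rest
  termination_by l => l.length
  decreasing_by
  · simp only [List.length_drop, List.length_cons]; omega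
  · simp

def replace_with_gazetteer_alt (tokens : List String) (gazetteer : List (String × Int)) :
    List String :=
  pvLoopB (pvIndexB (pvEntries (PySem.List.dedup (gazetteer.map Prod.fst)))) tokens

-- ===== PRECONDITION & SPEC =====
def Spec_replace_with_gazetteer (tokens : List String) (gazetteer : List (String × Int)) (out : List String) : Prop := out = replace_with_gazetteer_alt tokens gazetteer
instance (tokens : List String) (gazetteer : List (String × Int)) (out : List String) : Decidable (Spec_replace_with_gazetteer tokens gazetteer out) := by unfold Spec_replace_with_gazetteer; infer_instance

-- ===== CLAIM (what is proved, stated in full; the proofs are below) =====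
def Claim_equal_replace_with_gazetteer : Prop := ∀ (tokens : List String) (gazetteer : List (String × Int)), Dom_replace_with_gazetteer tokens gazetteer → Spec_replace_with_gazetteer tokens gazetteer (replace_with_gazetteer tokens gazetteer)

-- ===== LEMMAS AND PROOFS =====

theorem pvGoNeNil (sep : List Char) :
    ∀ fuel l cur acc, PySem.Chars.splitOn.go sep fuel l cur acc ≠ []
  | 0, l, cur, acc => by simp [PySem.Chars.splitOn.go]
  | fuel+1, [], cur, acc => by simp [PySem.Chars.splitOn.go]
  | fuel+1, c :: rest, cur, acc => by
      rw [PySem.Chars.splitOn.go]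
      split
      · exact pvGoNeNil sep fuel _ _ _
      · exact pvGoNeNil sep fuel _ _ _

theorem pvSplit_ne_nil (s : String) : pvSplit s ≠ [] := by
  have h : pvSplit s = (PySem.Chars.splitOn s.toList " ".toList).map String.ofList := by
    simp [pvSplit, PySem.Str.split?, PySem.Chars.split?]
  rw [h]
  intro hnil
  have h2 := List.map_eq_nil_iff.mp hnil
  rw [PySem.Chars.splitOn] at h2
  exact pvGoNeNil _ _ _ _ _ h2

-- the bucket the index stores under t is exactly the entries whose first token is t, in order
theorem pvBucket (entries : List (List String × String)) (t : String) :
    (pvIndexB entries).getD t [] =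
      entries.filter (fun e => PySem.List.pyGetD e.1 0 "" == t) := by
  unfold pvIndexB
  have hfold : entries.foldl
        (fun d e => d.modify (PySem.List.pyGetD e.1 0 "") [] (· ++ [e])) PySem.Dict.empty
      = (entries.map (fun e => (PySem.List.pyGetD e.1 0 "", e))).foldl
          (fun d q => d.modify q.1 [] (· ++ [q.2])) PySem.Dict.empty := by
    rw [List.foldl_map]
  rw [hfold, PySem.Dict.getD_foldl_modify_append]
  simp [List.filter_map, List.map_map, Function.comp_def]

-- A's first-match over all phrases equals B's first-match over the bucket of the current token
theorem pvFindAB (tokens : List String) (i : Nat) (t : String) (rest : List String)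
    (hdrop : tokens.drop i = t :: rest) :
    ∀ keys, pvFindA tokens i keys =
      Option.map (fun e => (e.2, e.1.length))
        (pvFindB (t :: rest)
          ((pvEntries keys).filter (fun e => PySem.List.pyGetD e.1 0 "" == t)))
  | [] => rfl
  | p :: ks => by
      have hslice : PySem.List.slice tokens (some (i : Int)) (some ((i : Int) + ((pvSplit p).length : Int)))
          = (t :: rest).take (pvSplit p).length := by
        rw [PySem.List.slice_natCast_add, hdrop]
      have hIH := pvFindAB tokens i t rest hdrop ks
      simp only [pvFindA]
      rw [hslice]
      simp only [pvEntries, List.map_cons, List.filter_cons]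
      by_cases hk : PySem.List.pyGetD (pvSplit p) 0 "" = t
      · simp only [hk, beq_self_eq_true, if_pos]
        simp only [pvFindB]
        by_cases hc : List.take (pvSplit p).length (t :: rest) = pvSplit p
        · simp [hc]
        · simp only [hc, if_false]
          simpa [pvEntries] using hIH
      · have hbeq : (PySem.List.pyGetD (pvSplit p) 0 "" == t) = false := by simpa using hk
        have hc : ¬ List.take (pvSplit p).length (t :: rest) = pvSplit p := by
          intro hc
          apply hk
          cases hpt : pvSplit p with
          | nil => exact absurd hpt (pvSplit_ne_nil p)
          | cons h0 tl =>
              rw [hpt] at hc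
              simp only [List.length_cons, List.take_succ_cons] at hc
              have ht0 : t = h0 := ((List.cons.injEq _ _ _ _).mp hc).1
              simp [PySem.List.pyGetD_zero_cons, ht0]
        rw [if_neg hc, hbeq]
        simpa [pvEntries] using hIH

-- what a successful first match tells us: membership and the prefix equation
theorem pvFindB_spec (s : List String) :
    ∀ cs e, pvFindB s cs = some e → e ∈ cs ∧ s.take e.1.length = e.1
  | [], e => by simp [pvFindB]
  | c :: cs, e => by
      intro h
      by_cases hc : s.take c.1.length = c.1
      · rw [pvFindB, if_pos hc] at h
        cases h
        exact ⟨List.mem_cons_self, hc⟩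
      · rw [pvFindB, if_neg hc] at h
        obtain ⟨h1, h2⟩ := pvFindB_spec s cs e h
        exact ⟨List.mem_cons_of_mem _ h1, h2⟩

-- a positive skip counter just consumes the next s loop indices
theorem pvSkipRun (tokens keys : List String) :
    ∀ s k i acc, s ≤ k →
      (List.range' i k).foldl (pvStepA tokens keys) (acc, s) =
      (List.range' (i + s) (k - s)).foldl (pvStepA tokens keys) (acc, 0) := by
  intro s
  induction s with
  | zero => intro k i acc _; simp
  | succ s ih =>
      intro k i acc hs
      cases k with
      | zero => omega
      | succ k =>
          have hstep : pvStepA tokens keys (acc, s + 1) i = (acc, s) := by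
            simp [pvStepA]
          have h1 : i + (s + 1) = i + 1 + s := by omega
          have h2 : k + 1 - (s + 1) = k - s := by omega
          rw [List.range'_succ, List.foldl_cons, hstep, ih k (i + 1) acc (by omega), h1, h2]

-- the matched prefix fits inside the remaining tokens
theorem pvTake_eq_len {α : Type} {l pt : List α} (h : l.take pt.length = pt) :
    pt.length ≤ l.length := by
  have := congrArg List.length h
  simp at this
  omega

-- main loop invariant: from position i with skip 0, A appends exactly B's output on tokens[i:]
theorem pvMain (tokens keys : List String) :
    ∀ k i acc, i + k = tokens.length →
      ((List.range' i k).foldl (pvStepA tokens keys) (acc, 0)).1 =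
        acc ++ pvLoopB (pvIndexB (pvEntries keys)) (tokens.drop i) := by
  intro k
  induction k using Nat.strong_induction_on with
  | _ k ih =>
    intro i acc hik
    cases k with
    | zero =>
        have : tokens.drop i = [] := by
          apply List.drop_of_length_le; omega
        simp [this, pvLoopB]
    | succ m =>
        have hi : i < tokens.length := by omega
        have hdrop : tokens.drop i = tokens[i] :: tokens.drop (i + 1) :=
          List.drop_eq_getElem_cons hi
        have hlen : (tokens.drop (i + 1)).length = m := by
          simp; omega
        rw [List.range'_succ, List.foldl_cons, hdrop]
        have hbucket := pvBucket (pvEntries keys) tokens[i]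
        cases hfb : pvFindB (tokens[i] :: tokens.drop (i + 1))
            ((pvEntries keys).filter (fun e => PySem.List.pyGetD e.1 0 "" == tokens[i])) with
        | none =>
            have hstep : pvStepA tokens keys (acc, 0) i = (acc ++ [tokens[i]], 0) := by
              simp only [pvStepA, ne_eq, not_true_eq_false]
              rw [pvFindAB tokens i tokens[i] (tokens.drop (i + 1)) hdrop keys, hfb]
              simp only [PySem.List.pyGetD_natCast, Option.map_none]
              simp
              rw [List.getElem?_eq_getElem hi]
              rfl
            rw [hstep, ih m (by omega) (i + 1) (acc ++ [tokens[i]]) (by omega)]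
            rw [pvLoopB, hbucket, hfb]
            simp
        | some e =>
            obtain ⟨hmem, htake⟩ :=
              pvFindB_spec (tokens[i] :: tokens.drop (i + 1)) _ e hfb
            have hne : e.1 ≠ [] := by
              have hm := (List.mem_filter.mp hmem).1
              simp only [pvEntries, List.mem_map] at hm
              obtain ⟨p, _, hp⟩ := hm
              rw [← hp]
              exact pvSplit_ne_nil p
            have hL1 : 1 ≤ e.1.length := by
              cases h : e.1 with
              | nil => exact absurd h hne
              | cons a b => simp
            have hLle : e.1.length ≤ m + 1 := by
              have := pvTake_eq_len htake
              simp only [List.length_cons, hlen] at this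
              omega
            have hstep : pvStepA tokens keys (acc, 0) i = (acc ++ [e.2], e.1.length - 1) := by
              simp only [pvStepA, ne_eq, not_true_eq_false]
              rw [pvFindAB tokens i tokens[i] (tokens.drop (i + 1)) hdrop keys, hfb]
              simp
            rw [hstep,
              pvSkipRun tokens keys (e.1.length - 1) m (i + 1) (acc ++ [e.2]) (by omega)]
            have harith : i + 1 + (e.1.length - 1) = i + e.1.length := by omega
            rw [harith,
              ih (m - (e.1.length - 1)) (by omega) (i + e.1.length) (acc ++ [e.2]) (by omega)]
            rw [pvLoopB, hbucket, hfb]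
            have hdd : (tokens.drop (i + 1)).drop (e.1.length - 1) =
                tokens.drop (i + e.1.length) := by
              rw [List.drop_drop]
              congr 1
            simp [hdd]

-- ===== VERDICT (by name: the statement is the Claim_ definition above) =====
theorem replace_with_gazetteer_spec : Claim_equal_replace_with_gazetteer := by
  intro tokens gazetteer _
  unfold Spec_replace_with_gazetteer replace_with_gazetteer replace_with_gazetteer_alt
  rw [List.range_eq_range']
  rw [pvMain tokens (PySem.List.dedup (gazetteer.map Prod.fst)) tokens.length 0 [] (by omega)]
  simp
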